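-- pv_equiv track=rewrite | github.com/grahame-student/oxo_tourney | oxo_tourney/player/kati_player.py | convert_position_to_row_and_col
-- ===== SOURCE A (Python) =====
-- def convert_position_to_row_and_col(element, size):
--     col = 0
--     row = 0
--     for var in range(size):
--         if element < (size * (var + 1)) and (element >= (size * var)):
--             col = element - (size * var)
--             row = var
--
--     return [col, row]
-- ===== SOURCE B (Python) =====
-- def convert_position_to_row_and_col(element, size):
--     if size > 0 and 0 <= element < size * size:
--         return [element % size, element // size]
--     return [0, 0]
-- ===== Notes on version B (the rewrite author's own statement) =====
-- stated objective: faster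
-- what changed: Replaces the O(size) loop that scans every row for the one containing the index with direct divmod arithmetic: col = element % size, row = element // size when the index is in range, [0, 0] otherwise.
import Mathlib
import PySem

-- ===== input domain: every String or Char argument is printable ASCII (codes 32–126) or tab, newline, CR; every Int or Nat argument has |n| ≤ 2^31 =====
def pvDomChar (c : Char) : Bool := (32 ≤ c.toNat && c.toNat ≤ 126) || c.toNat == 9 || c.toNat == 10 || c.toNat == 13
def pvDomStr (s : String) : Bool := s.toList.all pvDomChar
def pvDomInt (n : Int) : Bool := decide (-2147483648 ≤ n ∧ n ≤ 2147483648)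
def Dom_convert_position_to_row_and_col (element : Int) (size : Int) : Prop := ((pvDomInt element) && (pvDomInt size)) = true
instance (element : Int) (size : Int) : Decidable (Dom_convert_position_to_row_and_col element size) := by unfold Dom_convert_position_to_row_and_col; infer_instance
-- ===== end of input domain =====

-- B replaces A's O(size) row-scanning loop with O(1) divmod arithmetic (plus the in-range test A's loop encodes).


-- ===== PORT A =====
def convert_position_to_row_and_col (element : Int) (size : Int) : List Int :=
  let st := (PySem.List.pyRange 0 size 1).foldl
    (fun (s : Int × Int) var =>
      if element < size * (var + 1) ∧ size * var ≤ element then (element - size * var, var) else s)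
    (0, 0)
  [st.1, st.2]

-- ===== PORT B =====
def convert_position_to_row_and_col_alt (element : Int) (size : Int) : List Int :=
  if 0 < size ∧ 0 ≤ element ∧ element < size * size then
    [PySem.Int.mod element size, PySem.Int.floordiv element size]
  else [0, 0]

-- ===== PRECONDITION & SPEC =====
def Spec_convert_position_to_row_and_col (element : Int) (size : Int) (out : List Int) : Prop := out = convert_position_to_row_and_col_alt element size
instance (element : Int) (size : Int) (out : List Int) : Decidable (Spec_convert_position_to_row_and_col element size out) := by unfold Spec_convert_position_to_row_and_col; infer_instance

-- ===== CLAIM (what is proved, stated in full; the proofs are below) =====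
def Claim_equal_convert_position_to_row_and_col : Prop := ∀ (element : Int) (size : Int), Dom_convert_position_to_row_and_col element size → Spec_convert_position_to_row_and_col element size (convert_position_to_row_and_col element size)

-- ===== LEMMAS AND PROOFS =====

-- A's loop over range(n) ends in (element % size, element // size) when the index lies
-- in the first n rows, and keeps its initial (0, 0) otherwise.
theorem pv_loop_lemma (element size : Int) (hs : 0 < size) : ∀ n : Nat,
    (PySem.List.pyRange 0 n 1).foldl
      (fun (s : Int × Int) var =>
        if element < size * (var + 1) ∧ size * var ≤ element then (element - size * var, var) else s)
      (0, 0)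
    = if 0 ≤ element ∧ element < size * n then (element % size, element / size) else (0, 0) := by
  intro n
  induction n with
  | zero =>
      simp [PySem.List.pyRange_one_eq_nil]
  | succ n ih =>
      have hstep : (PySem.List.pyRange 0 ((n : Int) + 1) 1)
          = PySem.List.pyRange 0 (n : Int) 1 ++ [(n : Int)] :=
        PySem.List.pyRange_one_succ_right (by exact_mod_cast Int.natCast_nonneg n)
      push_cast
      rw [hstep, List.foldl_append, ih]
      simp only [List.foldl_cons, List.foldl_nil]
      by_cases hlo : size * (n : Int) ≤ element
      · by_cases hhi : element < size * ((n : Int) + 1)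
        · -- the final iteration fires: row n contains the index
          have he : 0 ≤ element := le_trans (by positivity) hlo
          have hq : element / size = (n : Int) := by
            have hrepr : element = (element - size * n) + n * size := by ring
            have h0 : (element - size * (n : Int)) / size = 0 :=
              Int.ediv_eq_zero_of_lt (by omega) (by nlinarith)
            calc element / size = ((element - size * n) + n * size) / size := by rw [← hrepr]
              _ = (element - size * n) / size + n := Int.add_mul_ediv_right _ _ (by omega)
              _ = (n : Int) := by rw [h0]; ring
          have hm : element % size = element - size * (n : Int) := by
            have := Int.ediv_add_emod element size
            rw [hq] at this; omega
          have : 0 ≤ element ∧ element < size * ((n : Int) + 1) := ⟨he, hhi⟩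
          simp [hlo, hhi, this, hq, hm]
        · -- element beyond the first n+1 rows: no iteration fired
          have hnot : ¬ (0 ≤ element ∧ element < size * (n : Int)) := by
            intro ⟨_, h⟩; exact hhi (by nlinarith)
          have hnot' : ¬ (0 ≤ element ∧ element < size * ((n : Int) + 1)) := by
            intro ⟨_, h⟩; exact hhi h
          simp [hnot, hhi]
      · -- last iteration does not fire; in-range for n+1 iff in-range for n
        have hiff : (0 ≤ element ∧ element < size * ((n : Int) + 1)) ↔
            (0 ≤ element ∧ element < size * (n : Int)) := by
          constructor
          · rintro ⟨h1, _⟩; exact ⟨h1, by omega⟩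
          · rintro ⟨h1, h2⟩; exact ⟨h1, by nlinarith⟩
        have h1 : ¬ (element < size * ((n : Int) + 1) ∧ size * (n : Int) ≤ element) :=
          fun h => hlo h.2
        rw [if_neg h1, if_congr hiff.symm rfl rfl]

theorem pv_loop_int (element size : Int) (hs : 0 < size) (m : Int) :
    (PySem.List.pyRange 0 m 1).foldl
      (fun (s : Int × Int) var =>
        if element < size * (var + 1) ∧ size * var ≤ element then (element - size * var, var) else s)
      (0, 0)
    = if 0 ≤ element ∧ element < size * m then (element % size, element / size) else (0, 0) := by
  by_cases hm : 0 < m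
  · have hc : m = ((m.toNat : Int)) := by omega
    rw [hc]; exact pv_loop_lemma element size hs m.toNat
  · rw [PySem.List.pyRange_one_eq_nil (by omega)]
    have hno : ¬ (0 ≤ element ∧ element < size * m) := by
      rintro ⟨h1, h2⟩; nlinarith
    simp [hno]

-- ===== VERDICT (by name: the statement is the Claim_ definition above) =====
theorem convert_position_to_row_and_col_spec : Claim_equal_convert_position_to_row_and_col := by
  intro element size _
  unfold Spec_convert_position_to_row_and_col
  by_cases hs : 0 < size
  · have hF := pv_loop_int element size hs size
    by_cases hin : 0 ≤ element ∧ element < size * size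
    · have hB : 0 < size ∧ 0 ≤ element ∧ element < size * size := ⟨hs, hin⟩
      simp [convert_position_to_row_and_col, convert_position_to_row_and_col_alt, hF, hin, hB,
        PySem.Int.mod_eq_emod_of_pos, PySem.Int.floordiv_eq_ediv_of_pos, hs]
    · have hB : ¬ (0 < size ∧ 0 ≤ element ∧ element < size * size) := fun h => hin h.2
      simp [convert_position_to_row_and_col, convert_position_to_row_and_col_alt, hF, hin]
  · have hnil : PySem.List.pyRange 0 size 1 = [] :=
      PySem.List.pyRange_one_eq_nil (by omega)
    have hB : ¬ (0 < size ∧ 0 ≤ element ∧ element < size * size) := fun h => hs h.1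
    simp [convert_position_to_row_and_col, convert_position_to_row_and_col_alt, hnil, hB]
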